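-- pv_equiv track=rewrite | github.com/Kapustin1937/Encrypt-messages-in-permutations | factoradic_converter.py | fact_to_dec
-- ===== SOURCE A (Python) =====
-- def fact_to_dec(factoradic: list):
--     """
--     Takes a list that represents a factoradic representation and return the corresponding number in decimal base
--     """
--     number = 0
--     n = 1
--     factorial = 1
--     for i in range(len(factoradic)-2, -1, -1):
--         number += factoradic[i] * factorial
--         n += 1
--         factorial *= n
--     return number
-- ===== SOURCE B (Python) =====
-- def fact_to_dec(factoradic: list):
--     """
--     Takes a list that represents a factoradic representation and return the corresponding number in decimal base
--     """
--     value = 0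
--     k = len(factoradic)
--     for d in factoradic[:-1]:
--         value = value * k + d
--         k -= 1
--     return value
-- ===== Notes on version B (the rewrite author's own statement) =====
-- stated objective: alternative
-- what changed: Replaces the reverse index loop that maintains an explicit running factorial with a forward Horner-style evaluation over factoradic[:-1] keeping only a partial value and a descending multiplier.
import Mathlib
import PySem

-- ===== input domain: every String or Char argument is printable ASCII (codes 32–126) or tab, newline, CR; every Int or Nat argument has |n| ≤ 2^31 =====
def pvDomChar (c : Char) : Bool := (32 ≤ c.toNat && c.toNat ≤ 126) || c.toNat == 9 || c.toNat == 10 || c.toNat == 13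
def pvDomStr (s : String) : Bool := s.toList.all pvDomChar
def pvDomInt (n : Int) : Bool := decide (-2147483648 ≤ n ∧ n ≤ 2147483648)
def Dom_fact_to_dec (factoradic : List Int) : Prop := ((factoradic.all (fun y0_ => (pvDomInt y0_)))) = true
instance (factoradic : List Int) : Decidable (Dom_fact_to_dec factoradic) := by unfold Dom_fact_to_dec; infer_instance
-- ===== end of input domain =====

-- B replaces A's reverse index loop with an explicit running factorial by a forward
-- Horner-style pass over factoradic[:-1] with a partial value and a descending multiplier
-- (alternative decomposition, same cost; return value only — neither mutates its argument).

-- ===== PORT A =====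
-- reverse loop: for i in range(len-2, -1, -1): number += factoradic[i]*factorial; n += 1; factorial *= n
def fact_to_dec (factoradic : List Int) : Int :=
  ((PySem.List.pyRange ((factoradic.length : Int) - 2) (-1) (-1)).foldl
    (fun (st : Int × Int × Int) i =>
      (st.1 + PySem.List.pyGetD factoradic i 0 * st.2.2, st.2.1 + 1, st.2.2 * (st.2.1 + 1)))
    (0, 1, 1)).1

-- ===== PORT B =====
-- Horner: value = 0; k = len; for d in factoradic[:-1]: value = value*k + d; k -= 1
def fact_to_dec_alt (factoradic : List Int) : Int :=
  ((PySem.List.slice factoradic none (some (-1))).foldl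
    (fun (st : Int × Int) d => (st.1 * st.2 + d, st.2 - 1))
    (0, (factoradic.length : Int))).1

-- ===== PRECONDITION & SPEC =====
def Spec_fact_to_dec (factoradic : List Int) (out : Int) : Prop := out = fact_to_dec_alt factoradic
instance (factoradic : List Int) (out : Int) : Decidable (Spec_fact_to_dec factoradic out) := by unfold Spec_fact_to_dec; infer_instance

-- ===== CLAIM (what is proved, stated in full; the proofs are below) =====
def Claim_equal_fact_to_dec : Prop := ∀ (factoradic : List Int), Dom_fact_to_dec factoradic → Spec_fact_to_dec factoradic (fact_to_dec factoradic)

-- ===== LEMMAS AND PROOFS =====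

/-- integer factorial -/
def fac (n : Nat) : Int := (Nat.factorial n : Int)

/-- the factoradic value of a digit list read forward: head digit weighted (len tail + 1)! -/
def fval : List Int → Int
  | [] => 0
  | d :: t => d * fac (t.length + 1) + fval t

/-- the factoradic value read with an explicit starting factorial index -/
def fvalR : List Int → Nat → Int
  | [], _ => 0
  | z :: t, n => z * fac n + fvalR t (n + 1)

theorem fac_succ (n : Nat) : fac (n + 1) = fac n * ((n : Int) + 1) := by
  simp [fac, Nat.factorial_succ]; ring

/-- B's loop computes v·(len+1)! + fval when started with multiplier len+1 -/
theorem loopB_eq (ys : List Int) : ∀ (v : Int),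
    ((ys.foldl (fun (st : Int × Int) d => (st.1 * st.2 + d, st.2 - 1))
      (v, (ys.length : Int) + 1)).1) = v * fac (ys.length + 1) + fval ys := by
  induction ys with
  | nil => intro v; simp [fval, fac, Nat.factorial]
  | cons d t ih =>
    intro v
    have h1 : ((d :: t).length : Int) + 1 - 1 = (t.length : Int) + 1 := by
      simp only [List.length_cons]; push_cast; ring
    simp only [List.foldl_cons, h1]
    rw [ih]
    simp only [fval, List.length_cons, fac_succ (t.length + 1)]
    push_cast; ring

/-- A's loop body over digits, with factorial invariant fac n -/
theorem loopA_eq (zs : List Int) : ∀ (num : Int) (n : Nat),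
    ((zs.foldl (fun (st : Int × Int × Int) d =>
        (st.1 + d * st.2.2, st.2.1 + 1, st.2.2 * (st.2.1 + 1)))
      (num, (n : Int), fac n)).1) = num + fvalR zs n := by
  induction zs with
  | nil => intro num n; simp [fvalR]
  | cons z t ih =>
    intro num n
    have h2 : fac n * ((n : Int) + 1) = fac (n + 1) := (fac_succ n).symm
    simp only [List.foldl_cons]
    rw [show ((n : Int) + 1) = ((n + 1 : Nat) : Int) by push_cast; ring] at h2 ⊢
    rw [h2, ih]
    simp [fvalR]; ring

theorem fvalR_append (t : List Int) : ∀ (z : Int) (n : Nat),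
    fvalR (t ++ [z]) n = fvalR t n + z * fac (n + t.length) := by
  induction t with
  | nil => intro z n; simp [fvalR]
  | cons a s ih =>
    intro z n
    simp only [List.cons_append, fvalR, ih, List.length_cons]
    rw [show n + (s.length + 1) = n + 1 + s.length by omega]
    ring

theorem fvalR_reverse (ys : List Int) : fvalR ys.reverse 1 = fval ys := by
  induction ys with
  | nil => simp [fvalR, fval]
  | cons d t ih =>
    simp only [List.reverse_cons, fvalR_append, ih, fval]
    rw [show 1 + t.reverse.length = t.length + 1 by simp [Nat.add_comm]]
    ring

/-- the index range of A maps onto dropLast -/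
theorem map_range_dropLast (xs : List Int) :
    (PySem.List.pyRange 0 ((xs.length : Int) - 1) 1).map (fun j => PySem.List.pyGetD xs j 0)
      = xs.dropLast := by
  cases xs with
  | nil => simp [PySem.List.pyRange_one_eq_nil]
  | cons x t =>
    have hlen : ((x :: t).length : Int) - 1 = ((x :: t).dropLast.length : Int) := by
      simp
    rw [hlen]
    refine Eq.trans ?_ (PySem.List.map_pyGetD_pyRange_zero' (xs := (x :: t).dropLast) (d := (0 : Int)))
    apply List.map_congr_left
    intro j hj
    have hj' := (PySem.List.mem_pyRange_one).1 hj
    have h0 : 0 ≤ j := hj'.1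
    have h1 : j < ((x :: t).dropLast.length : Int) := hj'.2
    have h1' : j < ((x :: t).length : Int) := by
      have : ((x :: t).dropLast.length : Int) ≤ ((x :: t).length : Int) := by
        simp
      omega
    rw [PySem.List.pyGetD_eq_getElem (x :: t) 0 h0 h1',
        PySem.List.pyGetD_eq_getElem (x :: t).dropLast 0 h0 h1]
    exact (List.getElem_dropLast _).symm

theorem fact_to_dec_eq_fval (xs : List Int) : fact_to_dec xs = fval xs.dropLast := by
  unfold fact_to_dec
  rw [show ((xs.length : Int) - 2) = (((xs.length : Int) - 1) - 1) by ring,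
      PySem.List.pyRange_neg_one_eq_reverse]
  rw [show (-1 : Int) + 1 = 0 by ring, show ((xs.length : Int) - 1 - 1 + 1) = (xs.length : Int) - 1 by ring]
  have hm : ∀ (l : List Int) (init : Int × Int × Int),
      l.foldl (fun st i => (st.1 + PySem.List.pyGetD xs i 0 * st.2.2, st.2.1 + 1, st.2.2 * (st.2.1 + 1))) init
        = (l.map (fun j => PySem.List.pyGetD xs j 0)).foldl
            (fun (st : Int × Int × Int) d => (st.1 + d * st.2.2, st.2.1 + 1, st.2.2 * (st.2.1 + 1))) init :=
    by
      intro l init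
      induction l generalizing init with
      | nil => rfl
      | cons a l ihl => simp only [List.foldl_cons, List.map_cons]; exact ihl _
  rw [hm, List.map_reverse, map_range_dropLast]
  have h2 := loopA_eq (xs.dropLast.reverse) 0 1
  simp only [Nat.cast_one, show fac 1 = 1 from rfl] at h2
  rw [h2, zero_add, fvalR_reverse]

theorem fact_to_dec_alt_eq_fval (xs : List Int) : fact_to_dec_alt xs = fval xs.dropLast := by
  unfold fact_to_dec_alt
  rw [PySem.List.slice_to_neg_one]
  cases xs with
  | nil => simp [fval]
  | cons x t =>
    have hlen : ((x :: t).length : Int) = ((x :: t).dropLast.length : Int) + 1 := by simp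
    rw [hlen, loopB_eq]
    ring

-- ===== VERDICT (by name: the statement is the Claim_ definition above) =====
theorem fact_to_dec_spec : Claim_equal_fact_to_dec := by
  intro xs _
  show fact_to_dec xs = fact_to_dec_alt xs
  rw [fact_to_dec_eq_fval, fact_to_dec_alt_eq_fval]
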